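-- pv_equiv track=rewrite | github.com/RobertSmithers/AdventOfCode2024 | day6/part1.py | drawGuardPath
-- ===== SOURCE A (Python) =====
-- steps = {
--     'left': (-1, 0),
--     'right': (1, 0),
--     'up': (0, -1),
--     'down': (0, 1)
-- }
--
-- def rotate_90(direction):
--     if direction == 'up':
--         return 'right'
--     if direction == 'right':
--         return 'down'
--     if direction == 'down':
--         return 'left'
--     if direction == 'left':
--         return 'up'
--
-- def isInBounds(arr, i, j):
--     return i >= 0 and j >= 0 and i < len(arr[0]) and j < len(arr)
--
-- def drawGuardPath(arr, i, j, direction="up"):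
--     unique_steps = 0
--     while isInBounds(arr, i, j) and arr[j][i] != '#':
--         if arr[j][i] != 'X':
--             unique_steps += 1
--             arr[j][i] = 'X'
--         dx, dy = steps[direction]
--         i += dx
--         j += dy
--     # Now we either hit a wall or left the "map"
--     if isInBounds(arr, i, j) and arr[j][i] == '#':
--         return unique_steps + drawGuardPath(arr, i - dx, j - dy, rotate_90(direction))
--
--     return unique_steps
-- ===== SOURCE B (Python) =====
-- def drawGuardPath(arr, i, j, direction="up"):
--     if not arr:
--         return 0
--     w, h = len(arr[0]), len(arr)
--     dirs = [(0, -1), (1, 0), (0, 1), (-1, 0)]  # up, right, down, left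
--     d = {'up': 0, 'right': 1, 'down': 2, 'left': 3}.get(direction, 0)
--     seen = set()
--     while 0 <= i < w and 0 <= j < h and arr[j][i] != '#':
--         seen.add((i, j))
--         dx, dy = dirs[d]
--         ni, nj = i + dx, j + dy
--         if 0 <= ni < w and 0 <= nj < h and arr[nj][ni] == '#':
--             d = (d + 1) % 4
--         else:
--             i, j = ni, nj
--     return sum(1 for (x, y) in seen if arr[y][x] != 'X')
-- ===== Notes on version B (the rewrite author's own statement) =====
-- stated objective: alternative
-- what changed: A marks visited cells 'X' in the grid and threads a counter through a while-loop-plus-recursion (overshoot onto the obstacle, back up one cell, recurse with the rotated direction); B leaves the grid untouched, runs one iterative loop over (position, direction index) that peeks one cell ahead and rotates in place, records visited cells in a set, and returns the number of visited cells whose original value is not 'X'.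
-- outside the precondition, e.g. on drawGuardPath([['.', '.'], ['.']], 0, 0, 'up'): A returns 1, B returns 1
import Mathlib
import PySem

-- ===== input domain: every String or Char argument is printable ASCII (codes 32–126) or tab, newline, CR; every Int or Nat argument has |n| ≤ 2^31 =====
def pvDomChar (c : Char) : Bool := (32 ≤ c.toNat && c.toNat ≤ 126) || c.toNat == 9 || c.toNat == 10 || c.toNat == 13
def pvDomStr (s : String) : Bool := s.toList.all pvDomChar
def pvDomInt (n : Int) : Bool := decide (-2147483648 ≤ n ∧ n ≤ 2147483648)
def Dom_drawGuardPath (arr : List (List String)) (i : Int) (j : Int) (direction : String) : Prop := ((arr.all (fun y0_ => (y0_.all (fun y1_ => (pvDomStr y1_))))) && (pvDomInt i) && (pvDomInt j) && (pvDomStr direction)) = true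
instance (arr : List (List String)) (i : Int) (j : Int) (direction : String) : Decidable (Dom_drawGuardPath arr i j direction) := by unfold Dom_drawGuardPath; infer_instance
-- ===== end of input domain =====

-- A mutates the grid to 'X' and threads a counter through a loop-plus-recursion (overshoot
-- onto the obstacle, back up one cell, recurse with the rotated direction); B leaves the
-- grid untouched, runs ONE iterative loop over (position, direction index) that peeks one
-- cell ahead and rotates in place, records visited cells in a set, and finally counts the
-- visited cells whose original value is not 'X'.  A mutates its argument in place and B
-- does not: the equivalence proved here is about the RETURN value only.
-- Both ports are fueled (the Python walk can cycle, on which A hits the recursion limit);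
-- the fuel is scaffolding only, generous enough for every terminating run, and the two
-- ports burn it in lockstep, so the equivalence holds for every fuel.

-- ===== PORT A =====
-- steps[direction]; the final (0, 0) stands for Python's KeyError branch (excluded by Pre_)
def pvStepsA (direction : String) : Int × Int :=
  if direction == "left" then (-1, 0)
  else if direction == "right" then (1, 0)
  else if direction == "up" then (0, -1)
  else if direction == "down" then (0, 1)
  else (0, 0)

-- rotate_90; Python falls through to None on any other string (unreachable under Pre_)
def pvRotA (direction : String) : String :=
  if direction == "up" then "right"
  else if direction == "right" then "down"
  else if direction == "down" then "left"
  else if direction == "left" then "up"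
  else ""

-- isInBounds; Python's len(arr[0]) raises on arr = [] when i, j ≥ 0 (excluded by Pre_)
def pvInBoundsA (arr : List (List String)) (i j : Int) : Bool :=
  decide (0 ≤ i) && decide (0 ≤ j) && decide (i < ((arr.headD []).length : Int)) && decide (j < (arr.length : Int))

-- arr[j][i]; the "" default stands for Python's IndexError (excluded by Pre_)
def pvCellA (arr : List (List String)) (i j : Int) : String :=
  (PySem.List.pyGet? ((PySem.List.pyGet? arr j).getD []) i).getD ""

-- arr[j][i] = 'X' (functional update; only reached with i, j ≥ 0 and in bounds)
def pvMarkA (arr : List (List String)) (i j : Int) : List (List String) :=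
  arr.set j.toNat ((arr.getD j.toNat []).set i.toNat "X")

-- the while loop of A: returns (arr, i, j, unique_steps, leftover fuel)
def pvLoopA : Nat → List (List String) → Int → Int → String → Int →
    List (List String) × Int × Int × Int × Nat
  | 0, arr, i, j, _, acc => (arr, i, j, acc, 0)
  | f + 1, arr, i, j, dir, acc =>
    if pvInBoundsA arr i j && !(pvCellA arr i j == "#") then
      let arr' := if pvCellA arr i j == "X" then arr else pvMarkA arr i j
      let acc' := if pvCellA arr i j == "X" then acc else acc + 1
      let d := pvStepsA dir
      pvLoopA f arr' (i + d.1) (j + d.2) dir acc'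
    else (arr, i, j, acc, f + 1)

-- drawGuardPath's body: the while loop, then the wall test and the recursive call; the
-- depth argument only makes the recursion structural (the recursion re-uses the leftover
-- fuel; each recursion level after the first burns at least one fuel, so depth = fuel + 4
-- at the top never runs out on a run the fuel completes)
def pvRunA : Nat → Nat → List (List String) → Int → Int → String → Int
  | 0, _, _, _, _, _ => 0
  | d + 1, fuel, arr, i, j, dir =>
    let t := pvLoopA fuel arr i j dir 0
    match t.2.2.2.2 with
    | 0 => t.2.2.2.1
    | r + 1 =>
      if pvInBoundsA t.1 t.2.1 t.2.2.1 && (pvCellA t.1 t.2.1 t.2.2.1 == "#") then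
        t.2.2.2.1 + pvRunA d (r + 1) t.1 (t.2.1 - (pvStepsA dir).1) (t.2.2.1 - (pvStepsA dir).2) (pvRotA dir)
      else t.2.2.2.1

def pvFuelA (arr : List (List String)) : Nat := 8 * (arr.headD []).length * arr.length + 16

def drawGuardPath (arr : List (List String)) (i : Int) (j : Int) (direction : String) : Int :=
  pvRunA (pvFuelA arr + 4) (pvFuelA arr) arr i j direction

-- ===== PORT B =====
-- the dirs table [(0,-1),(1,0),(0,1),(-1,0)] indexed by d (d is always 0..3)
def pvDirsB : List (Int × Int) := [(0, -1), (1, 0), (0, 1), (-1, 0)]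

def pvStepB (d : Int) : Int × Int := (PySem.List.pyGet? pvDirsB d).getD (0, 0)

-- {'up': 0, 'right': 1, 'down': 2, 'left': 3}.get(direction, 0)
def pvDirIdxB (direction : String) : Int :=
  if direction == "up" then 0
  else if direction == "right" then 1
  else if direction == "down" then 2
  else if direction == "left" then 3
  else 0

-- Source B's inline bounds test 0 <= i < w and 0 <= j < h
def pvBndB (w h i j : Int) : Bool :=
  decide (0 ≤ i) && decide (i < w) && decide (0 ≤ j) && decide (j < h)

-- arr[j][i], read with indices the loop has already bounds-checked (so i, j ≥ 0)
def pvCellB (arr : List (List String)) (i j : Int) : String :=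
  (arr.getD j.toNat []).getD i.toNat ""

-- Source B's single while loop over (i, j, d, seen): add the cell to the visited set, peek one
-- step ahead, rotate in place ((d+1) % 4) before a wall, otherwise advance
def pvLoopB : Nat → List (List String) → Int → Int → Int → Int → Int →
    PySem.Set (Int × Int) → PySem.Set (Int × Int)
  | 0, _, _, _, _, _, _, seen => seen
  | f + 1, arr, w, h, i, j, d, seen =>
    if pvBndB w h i j && !(pvCellB arr i j == "#") then
      let seen' := PySem.Set.add seen (i, j)
      let s := pvStepB d
      if pvBndB w h (i + s.1) (j + s.2) && (pvCellB arr (i + s.1) (j + s.2) == "#") then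
        pvLoopB f arr w h i j (PySem.Int.mod (d + 1) 4) seen'
      else pvLoopB f arr w h (i + s.1) (j + s.2) d seen'
    else seen

def pvFuelB (arr : List (List String)) : Nat := 8 * (arr.headD []).length * arr.length + 16

def drawGuardPath_alt (arr : List (List String)) (i : Int) (j : Int) (direction : String) : Int :=
  if arr = [] then 0
  else
    let w : Int := ((arr.headD []).length : Int)
    let h : Int := (arr.length : Int)
    let seen := pvLoopB (pvFuelB arr) arr w h i j (pvDirIdxB direction) (PySem.Set.empty)
    ((seen.filter (fun p => !(pvCellB arr p.1 p.2 == "X"))).length : Int)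

-- ===== PRECONDITION & SPEC =====
-- Pre_ excludes exactly the inputs on which A raises: IndexError on arr = [] with i, j ≥ 0
-- and on grids whose reachable rows are shorter than row 0 (this conservatively drops some
-- ragged grids whose short rows the walk never reaches, on which A returns and B agrees —
-- see cites), KeyError on an invalid direction once the walk starts, and UnboundLocalError
-- when the in-bounds start cell is '#'.  Termination of the walk has no closed form, so
-- Pre_ does not exclude cycling walks (there A exhausts the recursion limit; the fueled
-- ports agree for every fuel).
def Pre_drawGuardPath (arr : List (List String)) (i : Int) (j : Int) (direction : String) : Prop :=
  (arr = [] → i < 0 ∨ j < 0) ∧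
  ((0 ≤ i ∧ i < ((arr.headD []).length : Int) ∧ 0 ≤ j ∧ j < (arr.length : Int)) →
    (direction = "up" ∨ direction = "down" ∨ direction = "left" ∨ direction = "right") ∧
    (∀ row ∈ arr, (arr.headD []).length ≤ row.length) ∧
    (arr.getD j.toNat []).getD i.toNat "" ≠ "#")
instance (arr : List (List String)) (i : Int) (j : Int) (direction : String) : Decidable (Pre_drawGuardPath arr i j direction) := by unfold Pre_drawGuardPath; infer_instance

def pvWitness_drawGuardPath : List (List String) × Int × Int × String :=
  ([[".", "."], [".", "#"]], 0, 0, "up")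

def Spec_drawGuardPath (arr : List (List String)) (i : Int) (j : Int) (direction : String) (out : Int) : Prop := out = drawGuardPath_alt arr i j direction
instance (arr : List (List String)) (i : Int) (j : Int) (direction : String) (out : Int) : Decidable (Spec_drawGuardPath arr i j direction out) := by unfold Spec_drawGuardPath; infer_instance

-- ===== CLAIM (what is proved, stated in full; the proofs are below) =====
def Claim_equal_drawGuardPath : Prop := ∀ (arr : List (List String)) (i : Int) (j : Int) (direction : String), Dom_drawGuardPath arr i j direction → Pre_drawGuardPath arr i j direction → Spec_drawGuardPath arr i j direction (drawGuardPath arr i j direction)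

-- ===== LEMMAS AND PROOFS =====

-- the '-- proof-only helpers --' below are used solely by the lemmas and proofs

-- B's final count, as a function of the visited set (over the untouched grid)
def pvBCnt (orig : List (List String)) (seen : List (Int × Int)) : Int :=
  ((seen.filter (fun p => !(pvCellB orig p.1 p.2 == "X"))).length : Int)

-- the state correspondence between A's mutated grid and B's visited set
def pvInv (orig arrA : List (List String)) (seen : List (Int × Int)) : Prop :=
  arrA.length = orig.length ∧
  (arrA.headD []).length = (orig.headD []).length ∧
  (∀ k : Nat, (arrA.getD k []).length = (orig.getD k []).length) ∧
  (∀ p ∈ seen, 0 ≤ p.1 ∧ p.1 < ((orig.headD []).length : Int) ∧ 0 ≤ p.2 ∧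
      p.2 < ((orig.length : Int)) ∧ pvCellA orig p.1 p.2 ≠ "#") ∧
  (∀ x y : Int, 0 ≤ x → 0 ≤ y →
      pvCellA arrA x y = if (x, y) ∈ seen then "X" else pvCellA orig x y)

theorem pvCellB_eq (arr : List (List String)) (i j : Int) (h1 : 0 ≤ i) (h2 : 0 ≤ j) :
    pvCellB arr i j = pvCellA arr i j := by
  unfold pvCellB pvCellA
  rw [PySem.List.pyGet?_of_nonneg _ h2, PySem.List.pyGet?_of_nonneg _ h1]
  rw [List.getD_eq_getElem?_getD, List.getD_eq_getElem?_getD]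

-- A's bounds test, re-expressed with B's width/height once the lengths agree
theorem pvBnd_eq (arrA orig : List (List String)) (x y : Int)
    (hl : arrA.length = orig.length)
    (hh : (arrA.headD []).length = (orig.headD []).length) :
    pvInBoundsA arrA x y =
      pvBndB ((orig.headD []).length : Int) ((orig.length : Int)) x y := by
  unfold pvInBoundsA pvBndB
  rw [hl, hh]
  by_cases h1 : 0 ≤ x <;> by_cases h2 : 0 ≤ y <;>
    by_cases h3 : x < ((orig.headD []).length : Int) <;>
    by_cases h4 : y < ((orig.length : Int)) <;> simp [h1, h2, h4]

-- mark preserves the outer length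
theorem pvMark_len (a : List (List String)) (i j : Int) :
    (pvMarkA a i j).length = a.length := by
  unfold pvMarkA; exact List.length_set ..

-- mark preserves every row length
theorem pvMark_row_len (a : List (List String)) (i j : Int) (k : Nat) :
    ((pvMarkA a i j).getD k []).length = (a.getD k []).length := by
  unfold pvMarkA
  by_cases hjl : j.toNat < a.length
  · by_cases hk : k = j.toNat
    · rw [hk, List.getD_eq_getElem?_getD, List.getElem?_set_self hjl]
      simp
    · rw [List.getD_eq_getElem?_getD, List.getElem?_set_ne (by omega),
        ← List.getD_eq_getElem?_getD]
  · rw [List.set_eq_of_length_le (by omega)]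

theorem pvMark_headD_len (a : List (List String)) (i j : Int) :
    ((pvMarkA a i j).headD []).length = (a.headD []).length := by
  have h1 : (pvMarkA a i j).headD [] = (pvMarkA a i j).getD 0 [] := by
    cases h : pvMarkA a i j <;> simp
  have h2 : a.headD [] = a.getD 0 [] := by cases a <;> simp
  rw [h1, h2]; exact pvMark_row_len a i j 0

theorem pvCellB_mark_self (a : List (List String)) (i j : Int)
    (hj : j.toNat < a.length) (hi : i.toNat < (a.getD j.toNat []).length) :
    pvCellB (pvMarkA a i j) i j = "X" := by
  have hrow : (pvMarkA a i j).getD j.toNat [] = (a.getD j.toNat []).set i.toNat "X" := by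
    unfold pvMarkA
    rw [List.getD_eq_getElem?_getD, List.getElem?_set_self hj]
    rfl
  unfold pvCellB
  rw [hrow, List.getD_eq_getElem?_getD, List.getElem?_set_self hi]
  rfl

theorem pvCellB_mark_other (a : List (List String)) (i j x y : Int)
    (h0i : 0 ≤ i) (h0j : 0 ≤ j) (h0x : 0 ≤ x) (h0y : 0 ≤ y)
    (hne : x ≠ i ∨ y ≠ j) :
    pvCellB (pvMarkA a i j) x y = pvCellB a x y := by
  unfold pvCellB pvMarkA
  by_cases hjl : j.toNat < a.length
  · by_cases hyj : y.toNat = j.toNat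
    · rw [hyj, List.getD_eq_getElem?_getD
          (l := a.set j.toNat ((a.getD j.toNat []).set i.toNat "X")),
        List.getElem?_set_self hjl]
      simp only [Option.getD_some]
      have hx : i.toNat ≠ x.toNat := by rcases hne with h | h <;> omega
      rw [List.getD_eq_getElem?_getD (l := (a.getD j.toNat []).set i.toNat "X"),
        List.getElem?_set_ne hx, ← List.getD_eq_getElem?_getD]
    · rw [List.getD_eq_getElem?_getD (l := (a.set j.toNat ((a.getD j.toNat []).set i.toNat "X"))),
        List.getElem?_set_ne (by omega), ← List.getD_eq_getElem?_getD]
  · rw [List.set_eq_of_length_le (by omega)]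

-- the '#'-cells are the same in A's mutated grid and the untouched grid
theorem pvInv_hash (orig arrA : List (List String)) (seen : List (Int × Int))
    (hI : pvInv orig arrA seen) (x y : Int) (h0x : 0 ≤ x) (h0y : 0 ≤ y) :
    (pvCellA arrA x y == "#") = (pvCellA orig x y == "#") := by
  obtain ⟨_, _, _, hseen, hcell⟩ := hI
  rw [hcell x y h0x h0y]
  by_cases hm : (x, y) ∈ seen
  · have := (hseen _ hm).2.2.2.2
    simp [hm, this]
  · simp [hm]

-- A's loop condition equals B's loop condition under the correspondence
theorem pvCond_eq (orig arrA : List (List String)) (seen : List (Int × Int))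
    (hI : pvInv orig arrA seen) (x y : Int) :
    (pvInBoundsA arrA x y && !(pvCellA arrA x y == "#")) =
      (pvBndB ((orig.headD []).length : Int) ((orig.length : Int)) x y &&
        !(pvCellB orig x y == "#")) := by
  rw [pvBnd_eq arrA orig x y hI.1 hI.2.1]
  by_cases hb : pvBndB ((orig.headD []).length : Int) ((orig.length : Int)) x y = true
  · have h0x : 0 ≤ x := by
      simp only [pvBndB, Bool.and_eq_true, decide_eq_true_eq] at hb; exact hb.1.1.1
    have h0y : 0 ≤ y := by
      simp only [pvBndB, Bool.and_eq_true, decide_eq_true_eq] at hb; exact hb.1.2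
    rw [hb, pvCellB_eq orig x y h0x h0y, pvInv_hash orig arrA seen hI x y h0x h0y]
  · have hb' : pvBndB ((orig.headD []).length : Int) ((orig.length : Int)) x y = false := by
      simpa using hb
    rw [hb']; simp

-- likewise for the wall test (bounds AND cell == '#')
theorem pvWall_eq (orig arrA : List (List String)) (seen : List (Int × Int))
    (hI : pvInv orig arrA seen) (x y : Int) :
    (pvInBoundsA arrA x y && (pvCellA arrA x y == "#")) =
      (pvBndB ((orig.headD []).length : Int) ((orig.length : Int)) x y &&
        (pvCellB orig x y == "#")) := by
  rw [pvBnd_eq arrA orig x y hI.1 hI.2.1]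
  by_cases hb : pvBndB ((orig.headD []).length : Int) ((orig.length : Int)) x y = true
  · have h0x : 0 ≤ x := by
      simp only [pvBndB, Bool.and_eq_true, decide_eq_true_eq] at hb; exact hb.1.1.1
    have h0y : 0 ≤ y := by
      simp only [pvBndB, Bool.and_eq_true, decide_eq_true_eq] at hb; exact hb.1.2
    rw [hb, pvCellB_eq orig x y h0x h0y, pvInv_hash orig arrA seen hI x y h0x h0y]
  · have hb' : pvBndB ((orig.headD []).length : Int) ((orig.length : Int)) x y = false := by
      simpa using hb
    rw [hb']; simp

-- direction-table correspondence, by cases over the four strings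
theorem pvDir_step (dirS : String)
    (hv : dirS = "up" ∨ dirS = "right" ∨ dirS = "down" ∨ dirS = "left") :
    pvStepB (pvDirIdxB dirS) = pvStepsA dirS := by
  rcases hv with h | h | h | h <;> subst h <;> rfl

theorem pvDir_rot (dirS : String)
    (hv : dirS = "up" ∨ dirS = "right" ∨ dirS = "down" ∨ dirS = "left") :
    PySem.Int.mod (pvDirIdxB dirS + 1) 4 = pvDirIdxB (pvRotA dirS) ∧
    (pvRotA dirS = "up" ∨ pvRotA dirS = "right" ∨ pvRotA dirS = "down" ∨ pvRotA dirS = "left") := by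
  rcases hv with h | h | h | h <;> subst h <;> exact ⟨by decide, by decide⟩

-- the accumulator of the A-loop is a pure offset
theorem pvLoopA_acc (f : Nat) (arr : List (List String)) (i j : Int) (dir : String)
    (acc : Int) :
    pvLoopA f arr i j dir acc =
      ((pvLoopA f arr i j dir 0).1, (pvLoopA f arr i j dir 0).2.1,
       (pvLoopA f arr i j dir 0).2.2.1, acc + (pvLoopA f arr i j dir 0).2.2.2.1,
       (pvLoopA f arr i j dir 0).2.2.2.2) := by
  induction f generalizing arr i j acc with
  | zero => simp [pvLoopA]
  | succ f ih =>
    rw [pvLoopA]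
    conv_rhs => rw [pvLoopA]
    split
    · by_cases hx : (pvCellA arr i j == "X") = true
      · simp only [hx, if_true]
        rw [ih]
      · simp only [hx, Bool.false_eq_true, if_false]
        rw [ih _ _ _ (acc + 1), ih _ _ _ ((0 : Int) + 1)]
        simp only [Prod.mk.injEq, true_and, and_true]
        ring
    · simp

-- if the loop does not start, pvRunA returns 0
theorem pvRunA_notC (d f : Nat) (arr : List (List String)) (i j : Int) (dir : String)
    (hC : ¬ (pvInBoundsA arr i j && !(pvCellA arr i j == "#")) = true)
    (hW : ¬ (pvInBoundsA arr i j = true ∧ pvCellA arr i j = "#")) :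
    pvRunA d f arr i j dir = 0 := by
  have hb : pvInBoundsA arr i j = false := by
    cases h1 : pvInBoundsA arr i j
    · rfl
    · exfalso
      rcases h2 : pvCellA arr i j == "#" with _ | _
      · exact hC (by simp [h1, h2])
      · exact hW ⟨h1, by simpa using h2⟩
  cases d with
  | zero => rfl
  | succ d =>
    cases f with
    | zero => simp [pvRunA, pvLoopA]
    | succ f =>
      simp only [pvRunA, pvLoopA, hb, Bool.false_and, Bool.false_eq_true, if_false]

-- one entered iteration of A's loop, seen from pvRunA
theorem pvRunA_succ (d g : Nat) (arr : List (List String)) (i j : Int) (dir : String)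
    (hc : (pvInBoundsA arr i j && !(pvCellA arr i j == "#")) = true) :
    pvRunA (d + 1) (g + 1) arr i j dir =
      (if pvCellA arr i j == "X" then (0 : Int) else 1) +
      pvRunA (d + 1) g (if pvCellA arr i j == "X" then arr else pvMarkA arr i j)
        (i + (pvStepsA dir).1) (j + (pvStepsA dir).2) dir := by
  set c : Int := if pvCellA arr i j == "X" then (0 : Int) else 1 with hcdef
  set arr' := if pvCellA arr i j == "X" then arr else pvMarkA arr i j with harrdef
  have hstep : pvLoopA (g + 1) arr i j dir 0 =
      pvLoopA g arr' (i + (pvStepsA dir).1) (j + (pvStepsA dir).2) dir c := by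
    rw [pvLoopA]
    simp only [hc, if_true]
    by_cases hx : (pvCellA arr i j == "X") = true <;>
      simp [hx, hcdef, harrdef]
  have hacc := pvLoopA_acc g arr' (i + (pvStepsA dir).1) (j + (pvStepsA dir).2) dir c
  rcases ht : pvLoopA g arr' (i + (pvStepsA dir).1) (j + (pvStepsA dir).2) dir 0 with
    ⟨A2, I2, J2, a2, r2⟩
  rw [ht] at hacc
  simp only at hacc
  conv_lhs => rw [pvRunA]
  conv_rhs => rw [pvRunA]
  simp only [hstep, hacc, ht]
  cases r2 with
  | zero => simp
  | succ r =>
    simp only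
    split
    · ring
    · ring

-- adding the current cell to the visited set: the count moves exactly like A's counter
theorem pvBCnt_add (orig : List (List String)) (seen : List (Int × Int)) (i j : Int)
    (h0i : 0 ≤ i) (h0j : 0 ≤ j) :
    pvBCnt orig (PySem.Set.add seen (i, j)) =
      pvBCnt orig seen +
        (if (i, j) ∈ seen then (0 : Int)
         else if pvCellA orig i j == "X" then 0 else 1) := by
  by_cases hm : (i, j) ∈ seen
  · rw [PySem.Set.add_of_mem hm]
    simp [hm]
  · rw [PySem.Set.add_of_not_mem hm]
    unfold pvBCnt
    rw [List.filter_append, List.length_append]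
    by_cases hx : (pvCellA orig i j == "X") = true <;>
      simp [hm, hx, pvCellB_eq orig i j h0i h0j]

-- one entered iteration preserves the grid/set correspondence
theorem pvInv_step (orig arrA : List (List String)) (seen : List (Int × Int))
    (hrows : ∀ row ∈ orig, (orig.headD []).length ≤ row.length)
    (hI : pvInv orig arrA seen) (i j : Int)
    (hb : pvInBoundsA arrA i j = true) (hcell : pvCellA arrA i j ≠ "#") :
    pvInv orig (if pvCellA arrA i j == "X" then arrA else pvMarkA arrA i j)
      (PySem.Set.add seen (i, j)) := by
  obtain ⟨hl, hh, hr, hseen, hc⟩ := hI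
  simp only [pvInBoundsA, Bool.and_eq_true, decide_eq_true_eq] at hb
  obtain ⟨⟨⟨h0i, h0j⟩, hiw⟩, hjh⟩ := hb
  have hiW : i < ((orig.headD []).length : Int) := by rw [← hh]; exact hiw
  have hjH : j < ((orig.length : Int)) := by rw [← hl]; exact hjh
  have hOcell : pvCellA orig i j ≠ "#" := by
    by_cases hm : (i, j) ∈ seen
    · exact (hseen _ hm).2.2.2.2
    · have h5 := hc i j h0i h0j
      rw [if_neg hm] at h5
      rw [← h5]; exact hcell
  have hjlt : j.toNat < orig.length := by omega
  have horow : orig.getD j.toNat [] ∈ orig := by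
    rw [List.getD_eq_getElem?_getD, List.getElem?_eq_getElem hjlt]
    exact List.getElem_mem hjlt
  have hrowlen : (orig.headD []).length ≤ (orig.getD j.toNat []).length := hrows _ horow
  have hilt : i.toNat < (arrA.getD j.toNat []).length := by rw [hr j.toNat]; omega
  have hjltA : j.toNat < arrA.length := by omega
  refine ⟨?_, ?_, ?_, ?_, ?_⟩
  · split
    · exact hl
    · rw [pvMark_len]; exact hl
  · split
    · exact hh
    · rw [pvMark_headD_len]; exact hh
  · intro k
    split
    · exact hr k
    · rw [pvMark_row_len]; exact hr k
  · intro p hp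
    rcases (PySem.Set.mem_add _ _ _).1 hp with hm | hm
    · exact hseen _ hm
    · subst hm
      exact ⟨h0i, hiW, h0j, hjH, hOcell⟩
  · intro x y h0x h0y
    by_cases hxy : (x, y) = (i, j)
    · rw [Prod.mk.injEq] at hxy
      obtain ⟨rfl, rfl⟩ := hxy
      rw [if_pos ((PySem.Set.mem_add _ _ _).2 (Or.inr rfl))]
      by_cases hX : (pvCellA arrA x y == "X") = true
      · rw [if_pos hX]
        exact eq_of_beq hX
      · rw [if_neg hX]
        rw [← pvCellB_eq _ _ _ h0i h0j]
        exact pvCellB_mark_self arrA x y hjltA hilt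
    · have hmem : ((x, y) ∈ PySem.Set.add seen (i, j)) ↔ ((x, y) ∈ seen) := by
        rw [PySem.Set.mem_add]
        constructor
        · rintro (h | h)
          · exact h
          · exact absurd h hxy
        · exact Or.inl
      have hne : x ≠ i ∨ y ≠ j := by
        by_cases h : x = i
        · exact Or.inr fun hy => hxy (by rw [h, hy])
        · exact Or.inl h
      have hsame : pvCellA (if pvCellA arrA i j == "X" then arrA else pvMarkA arrA i j) x y
          = pvCellA arrA x y := by
        split
        · rfl
        · rw [← pvCellB_eq _ _ _ h0x h0y, ← pvCellB_eq arrA _ _ h0x h0y]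
          exact pvCellB_mark_other arrA i j x y h0i h0j h0x h0y hne
      rw [hsame, hc x y h0x h0y]
      by_cases hm : (x, y) ∈ seen
      · rw [if_pos hm, if_pos (hmem.2 hm)]
      · rw [if_neg hm, if_neg (fun h => hm (hmem.1 h))]

-- the two ports run in lockstep: same fuel, corresponding states, equal running counts
theorem pv_lock (orig : List (List String))
    (hrows : ∀ row ∈ orig, (orig.headD []).length ≤ row.length) :
    ∀ (f d : Nat) (arrA : List (List String)) (i j : Int) (dirS : String)
      (seen : List (Int × Int)), f < d →
      (dirS = "up" ∨ dirS = "right" ∨ dirS = "down" ∨ dirS = "left") →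
      pvInv orig arrA seen →
      ¬ (pvInBoundsA arrA i j = true ∧ pvCellA arrA i j = "#") →
      pvBCnt orig (pvLoopB f orig ((orig.headD []).length : Int) ((orig.length : Int))
          i j (pvDirIdxB dirS) seen)
        = pvBCnt orig seen + pvRunA d f arrA i j dirS := by
  intro f
  induction f with
  | zero =>
    intro d arrA i j dirS seen hd hv hI hW
    cases d with
    | zero => omega
    | succ d => simp [pvLoopB, pvRunA, pvLoopA]
  | succ g ih =>
    intro d arrA i j dirS seen hd hv hI hW
    obtain ⟨d', rfl⟩ : ∃ d', d = d' + 1 := ⟨d - 1, by omega⟩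
    have hcond := pvCond_eq orig arrA seen hI i j
    by_cases hC : (pvInBoundsA arrA i j && !(pvCellA arrA i j == "#")) = true
    · have h0i : 0 ≤ i := by
        simp only [pvInBoundsA, Bool.and_eq_true, decide_eq_true_eq] at hC
        exact hC.1.1.1.1
      have h0j : 0 ≤ j := by
        simp only [pvInBoundsA, Bool.and_eq_true, decide_eq_true_eq] at hC
        exact hC.1.1.1.2
      have hbA : pvInBoundsA arrA i j = true := by
        simp only [Bool.and_eq_true] at hC
        exact hC.1
      have hne : pvCellA arrA i j ≠ "#" := by
        simp only [Bool.and_eq_true, Bool.not_eq_eq_eq_not, Bool.not_true,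
          beq_eq_false_iff_ne, ne_eq] at hC
        exact hC.2
      rw [pvLoopB]
      rw [← hcond]
      simp only [hC, if_true, pvDir_step dirS hv]
      set arr' := if pvCellA arrA i j == "X" then arrA else pvMarkA arrA i j with harr'
      set cA : Int := if pvCellA arrA i j == "X" then (0 : Int) else 1 with hcA
      have hI' : pvInv orig arr' (PySem.Set.add seen (i, j)) :=
        pvInv_step orig arrA seen hrows hI i j hbA hne
      have hcnt : pvBCnt orig (PySem.Set.add seen (i, j)) = pvBCnt orig seen + cA := by
        rw [pvBCnt_add orig seen i j h0i h0j, hcA]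
        congr 1
        by_cases hm : (i, j) ∈ seen
        · have h5 := hI.2.2.2.2 i j h0i h0j
          rw [if_pos hm] at h5
          simp [hm, h5]
        · have h5 := hI.2.2.2.2 i j h0i h0j
          rw [if_neg hm] at h5
          rw [if_neg hm, h5]
      rw [pvRunA_succ d' g arrA i j dirS hC, ← harr', ← hcA]
      have hwall := pvWall_eq orig arr' (PySem.Set.add seen (i, j)) hI'
        (i + (pvStepsA dirS).1) (j + (pvStepsA dirS).2)
      by_cases hw : (pvInBoundsA arr' (i + (pvStepsA dirS).1) (j + (pvStepsA dirS).2) &&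
          (pvCellA arr' (i + (pvStepsA dirS).1) (j + (pvStepsA dirS).2) == "#")) = true
      · -- a wall ahead: B rotates in place, A overshoots, backs up and recurses
        rw [← hwall]
        simp only [hw, if_true, (pvDir_rot dirS hv).1]
        have hXat : pvCellA arr' i j = "X" := by
          have h5 := hI'.2.2.2.2 i j h0i h0j
          rw [if_pos ((PySem.Set.mem_add _ _ _).2 (Or.inr rfl))] at h5
          exact h5
        have hW' : ¬ (pvInBoundsA arr' i j = true ∧ pvCellA arr' i j = "#") := by
          rintro ⟨_, hcc⟩
          rw [hXat] at hcc
          exact absurd hcc (by decide)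
        cases g with
        | zero =>
          have hz : pvRunA (d' + 1) 0 arr' (i + (pvStepsA dirS).1)
              (j + (pvStepsA dirS).2) dirS = 0 := by
            simp [pvRunA, pvLoopA]
          rw [pvLoopB, hz, hcnt]
          ring
        | succ g' =>
          have hCnext : ¬ (pvInBoundsA arr' (i + (pvStepsA dirS).1) (j + (pvStepsA dirS).2) &&
              !(pvCellA arr' (i + (pvStepsA dirS).1) (j + (pvStepsA dirS).2) == "#")) = true := by
            simp only [Bool.and_eq_true] at hw ⊢
            simp [hw.1, hw.2]
          have hAnext : pvRunA (d' + 1) (g' + 1) arr' (i + (pvStepsA dirS).1)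
              (j + (pvStepsA dirS).2) dirS =
              pvRunA d' (g' + 1) arr' i j (pvRotA dirS) := by
            conv_lhs => rw [pvRunA]
            simp only [pvLoopA, hCnext, Bool.false_eq_true, if_false]
            simp only [hw, if_true]
            have e1 : i + (pvStepsA dirS).1 - (pvStepsA dirS).1 = i := by ring
            have e2 : j + (pvStepsA dirS).2 - (pvStepsA dirS).2 = j := by ring
            rw [e1, e2]
            ring
          rw [hAnext]
          rw [ih d' arr' i j (pvRotA dirS) (PySem.Set.add seen (i, j)) (by omega)
            (pvDir_rot dirS hv).2 hI' hW', hcnt]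
          ring
      · -- free cell (or out of bounds) ahead: both advance
        rw [← hwall]
        simp only [hw, Bool.false_eq_true, if_false]
        have hWnext : ¬ (pvInBoundsA arr' (i + (pvStepsA dirS).1) (j + (pvStepsA dirS).2) = true ∧
            pvCellA arr' (i + (pvStepsA dirS).1) (j + (pvStepsA dirS).2) = "#") := by
          rintro ⟨hb1, hb2⟩
          exact hw (by simp [hb1, hb2])
        rw [ih (d' + 1) arr' (i + (pvStepsA dirS).1) (j + (pvStepsA dirS).2) dirS
          (PySem.Set.add seen (i, j)) (by omega) hv hI' hWnext, hcnt]
        ring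
    · -- the loop never starts: both keep their current count
      rw [pvLoopB]
      rw [← hcond]
      simp only [hC, Bool.false_eq_true, if_false]
      rw [pvRunA_notC (d' + 1) (g + 1) arrA i j dirS hC hW]
      ring

-- the trivial correspondence at the start of the walk
theorem pvInv_init (orig : List (List String)) : pvInv orig orig [] := by
  refine ⟨rfl, rfl, fun k => rfl, ?_, ?_⟩
  · intro p hp
    exact absurd hp (List.not_mem_nil)
  · intro x y _ _
    rw [if_neg (List.not_mem_nil)]

theorem pvInBoundsA_nil (i j : Int) : pvInBoundsA [] i j = false := by
  unfold pvInBoundsA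
  by_cases h : 0 ≤ i <;> simp [h]

-- ===== VERDICT (by name: the statements are the Claim_ definitions above) =====
theorem drawGuardPath_spec : Claim_equal_drawGuardPath := by
  intro arr i j direction _ hpre
  unfold Spec_drawGuardPath drawGuardPath drawGuardPath_alt
  by_cases harr : arr = []
  · subst harr
    rw [if_pos rfl]
    have hW : ¬ (pvInBoundsA ([] : List (List String)) i j = true ∧
        pvCellA [] i j = "#") := by
      rw [pvInBoundsA_nil]
      rintro ⟨h, _⟩
      exact absurd h (by decide)
    rw [pvRunA_notC _ _ _ _ _ _ (by rw [pvInBoundsA_nil]; simp) hW]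
  · rw [if_neg harr]
    by_cases hs : 0 ≤ i ∧ i < ((arr.headD []).length : Int) ∧ 0 ≤ j ∧ j < ((arr.length : Int))
    · obtain ⟨hdir0, hrows, hcne⟩ := hpre.2 hs
      have hv : direction = "up" ∨ direction = "right" ∨ direction = "down" ∨
          direction = "left" := by tauto
      have hW : ¬ (pvInBoundsA arr i j = true ∧ pvCellA arr i j = "#") := by
        rintro ⟨_, hcc⟩
        apply hcne
        rw [← pvCellB_eq arr i j hs.1 hs.2.2.1] at hcc
        exact hcc
      have h := pv_lock arr hrows (pvFuelA arr) (pvFuelA arr + 4) arr i j direction []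
        (by omega) hv (pvInv_init arr) hW
      have h0 : pvBCnt arr ([] : List (Int × Int)) = 0 := rfl
      rw [h0, zero_add] at h
      exact h.symm
    · have hbnd : pvBndB ((arr.headD []).length : Int) ((arr.length : Int)) i j = false := by
        rw [Bool.eq_false_iff]
        intro hb
        apply hs
        simp only [pvBndB, Bool.and_eq_true, decide_eq_true_eq] at hb
        exact ⟨hb.1.1.1, hb.1.1.2, hb.1.2, hb.2⟩
      have hbA : pvInBoundsA arr i j = false := by
        rw [pvBnd_eq arr arr i j rfl rfl]
        exact hbnd
      have hW : ¬ (pvInBoundsA arr i j = true ∧ pvCellA arr i j = "#") := by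
        rw [hbA]
        rintro ⟨h, _⟩
        exact absurd h (by decide)
      rw [pvRunA_notC _ _ _ _ _ _ (by rw [hbA]; simp) hW]
      show (0 : Int) = pvBCnt arr (pvLoopB (pvFuelB arr) arr ((arr.headD []).length : Int)
        ((arr.length : Int)) i j (pvDirIdxB direction) [])
      obtain ⟨F, hF⟩ : ∃ F, pvFuelB arr = F + 1 :=
        ⟨8 * (arr.headD []).length * arr.length + 15, by unfold pvFuelB; omega⟩
      rw [hF, pvLoopB, hbnd]
      simp only [Bool.false_and, Bool.false_eq_true, if_false]
      rfl
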